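-- pv_equiv track=rewrite | github.com/Hyun642/coding_test | py/프로그래머스/Lv. 2/문자열_String/이진 변환 반복하기.py | solution
-- ===== SOURCE A (Python) =====
-- def solution(s):
--     i=0
--     zero=0
--     while s != "1":
--         zero += s.count('0')
--         s = s.replace('0','')
--         s = bin(len(s))[2:]
--         i+=1
--     return [i,zero]
-- ===== SOURCE B (Python) =====
-- def solution(s):
--     # Dynamic programming over all values 1..n (bottom-up table), not a walk
--     # along the popcount trajectory: dp tables steps/zeros give, for each k,
--     # the rounds and removed zeros from the binary string of k down to "1".
--     if s == "1":
--         return [0, 0]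
--     z0 = s.count('0')
--     n = len(s) - z0            # length after the first removal round
--     steps = [0, 0]             # steps[k], zeros[k] for k = 0, 1
--     zeros = [0, 0]
--     for k in range(2, n + 1):
--         p = k.bit_count()
--         steps.append(steps[p] + 1)
--         zeros.append(zeros[p] + (k.bit_length() - p))
--     return [steps[n] + 1, zeros[n] + z0]
-- ===== Notes on version B (the rewrite author's own statement) =====
-- stated objective: alternative
-- what changed: B does not follow the popcount trajectory like A's while-loop over rebuilt binary strings; after one scan of s it builds bottom-up dynamic-programming tables steps[k]/zeros[k] for every k up to n (ascending k, steps[k]=steps[popcount k]+1), then answers by a single table lookup. Pre_ excludes strings whose characters are all '0' (including the empty string), on which A loops forever.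
-- outside the precondition, e.g. on solution('0'): A does not finish within the time limit, B returns [1, 1]
import Mathlib
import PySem

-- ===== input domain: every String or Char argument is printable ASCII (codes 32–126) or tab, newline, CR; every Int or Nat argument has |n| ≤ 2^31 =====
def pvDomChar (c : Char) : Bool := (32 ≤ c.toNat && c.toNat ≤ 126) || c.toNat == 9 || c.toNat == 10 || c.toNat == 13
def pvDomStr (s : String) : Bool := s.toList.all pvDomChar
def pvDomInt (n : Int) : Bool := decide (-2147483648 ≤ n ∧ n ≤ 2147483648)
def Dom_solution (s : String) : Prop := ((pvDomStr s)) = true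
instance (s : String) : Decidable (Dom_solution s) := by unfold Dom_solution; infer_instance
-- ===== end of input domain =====

-- B replaces A's trajectory-following while-loop by a bottom-up DP table over k = 2..n; equal on Pre_.

-- ===== PORT A =====
-- A-side helper: A's while-loop over the string state, with fuel.  A diverges on strings
-- made only of zero digits, incl. the empty string; Pre_ excludes those, and on admitted
-- inputs the fuel s.length+2 is proved sufficient below.
def solLoopA : Nat → List Char → Int → Int → List Int
  | 0, _, i, zero => [i, zero]
  | fuel+1, cs, i, zero =>
    if cs = ['1'] then [i, zero]
    else
      let zero' := zero + (PySem.Chars.count cs ['0'] : Int)       -- zero += s.count('0')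
      let cs' := PySem.Chars.replace cs ['0'] []                   -- s = s.replace('0','')
      let cs'' := PySem.Chars.slice (PySem.Int.pyBin (cs'.length : Int)).toList (some 2) none
                                                                   -- s = bin(len(s))[2:]
      solLoopA fuel cs'' (i + 1) zero'

def solution (s : String) : List Int := solLoopA (s.toList.length + 2) s.toList 0 0

-- ===== PORT B =====
-- B: one scan for z0 and n, then a DP table over k = 2..n; one fold over the range,
-- carrying the two growing tables (steps, zeros); Python's steps[p] is in range on every
-- reached state (1 ≤ p < k = len(steps)), so pyGetD with default 0 is exact here.
def solution_alt (s : String) : List Int :=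
  if s = "1" then [0, 0]
  else
    let z0 : Int := (PySem.Str.count s "0" : Int)
    let n : Int := PySem.Str.len s - z0
    let tables : List Int × List Int :=
      (PySem.List.pyRange 2 (n + 1) 1).foldl
        (fun (st : List Int × List Int) (k : Int) =>
          let p : Int := (PySem.Int.bitCount k : Int)
          (st.1 ++ [PySem.List.pyGetD st.1 p 0 + 1],
           st.2 ++ [PySem.List.pyGetD st.2 p 0 + ((PySem.Int.bitLength k : Int) - p)]))
        ([0, 0], [0, 0])
    [PySem.List.pyGetD tables.1 n 0 + 1, PySem.List.pyGetD tables.2 n 0 + z0]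

-- ===== PRECONDITION & SPEC =====
-- Pre_ excludes exactly the inputs on which A never returns: strings in which every
-- character is a zero digit (including the empty string), where A loops forever.
def Pre_solution (s : String) : Prop := (s.toList.any (fun c => c ≠ '0')) = true
instance (s : String) : Decidable (Pre_solution s) := by unfold Pre_solution; infer_instance

def pvWitness_solution : String := "110"

def Spec_solution (s : String) (out : List Int) : Prop := out = solution_alt s
instance (s : String) (out : List Int) : Decidable (Spec_solution s out) := by unfold Spec_solution; infer_instance

-- ===== CLAIM (what is proved, stated in full; the proofs are below) =====
def Claim_equal_solution : Prop := ∀ (s : String), Dom_solution s → Pre_solution s → Spec_solution s (solution s)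

-- ===== LEMMAS AND PROOFS =====

-- popcount decreases, for the recursions below
theorem pvBitCount_lt (m : Nat) (h : 2 ≤ m) : PySem.Int.bitCount (m : Int) < m := by
  induction m using Nat.strong_induction_on with
  | _ m ih =>
    rw [PySem.Int.bitCount_natCast (by omega)]
    by_cases h2 : m / 2 < 2
    · have h1 : m / 2 = 1 := by omega
      rw [h1]
      have : PySem.Int.bitCount ((1 : Nat) : Int) = 1 := by decide
      omega
    · have := ih (m / 2) (by omega) (by omega)
      omega

-- mathematical trajectory values (proof-only; neither port computes with these)
def stepsFrom (n : Int) : Int :=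
  if h : n < 2 then 0 else stepsFrom (PySem.Int.bitCount n : Int) + 1
termination_by n.toNat
decreasing_by
  have h2 : ((n.toNat : Nat) : Int) = n := Int.toNat_of_nonneg (by omega)
  have := pvBitCount_lt n.toNat (by omega)
  rw [← h2]; simp only [Int.toNat_natCast]; omega

def zerosFrom (n : Int) : Int :=
  if h : n < 2 then 0
  else zerosFrom (PySem.Int.bitCount n : Int) +
    ((PySem.Int.bitLength n : Int) - (PySem.Int.bitCount n : Int))
termination_by n.toNat
decreasing_by
  have h2 : ((n.toNat : Nat) : Int) = n := Int.toNat_of_nonneg (by omega)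
  have := pvBitCount_lt n.toNat (by omega)
  rw [← h2]; simp only [Int.toNat_natCast]; omega

theorem stepsFrom_lt2 {n : Int} (h : n < 2) : stepsFrom n = 0 := by rw [stepsFrom]; simp [h]
theorem zerosFrom_lt2 {n : Int} (h : n < 2) : zerosFrom n = 0 := by rw [zerosFrom]; simp [h]
theorem stepsFrom_ge2 {n : Int} (h : ¬ n < 2) :
    stepsFrom n = stepsFrom (PySem.Int.bitCount n : Int) + 1 := by rw [stepsFrom]; simp [h]
theorem zerosFrom_ge2 {n : Int} (h : ¬ n < 2) :
    zerosFrom n = zerosFrom (PySem.Int.bitCount n : Int) +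
      ((PySem.Int.bitLength n : Int) - (PySem.Int.bitCount n : Int)) := by
  rw [zerosFrom]; simp [h]

-- Chars.count with single-character needle counts characters
theorem pvCountGo (l : List Char) : ∀ (fuel : Nat) (acc : Nat), l.length ≤ fuel →
    PySem.Chars.count.go ['0'] fuel l acc = acc + l.count '0' := by
  induction l with
  | nil => intro fuel acc _; cases fuel <;> simp [PySem.Chars.count.go]
  | cons c t ih =>
    intro fuel acc hf
    cases fuel with
    | zero => simp at hf
    | succ f =>
      have hpf : List.isPrefixOf ['0'] (c :: t) = ('0' == c) := by
        simp [List.isPrefixOf]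
      simp only [PySem.Chars.count.go, hpf]
      by_cases hc : c = '0'
      · subst hc
        simp only [beq_self_eq_true, if_pos]
        rw [show List.drop (List.length ['0']) ('0' :: t) = t from rfl]
        rw [ih f (acc + 1) (by simpa using hf)]
        simp [List.count_cons]
        omega
      · have hb : ('0' == c) = false := beq_eq_false_iff_ne.mpr (Ne.symm hc)
        rw [hb, if_neg (by simp)]
        rw [ih f acc (by simpa using hf)]
        simp [List.count_cons, hc]

theorem pvCount0 (cs : List Char) : PySem.Chars.count cs ['0'] = cs.count '0' := by
  simp only [PySem.Chars.count, List.isEmpty, Bool.false_eq_true, if_false]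
  rw [pvCountGo cs cs.length 0 (le_refl _)]
  omega

-- Chars.replace deleting a single character is a filter
theorem pvReplaceGo (l : List Char) : ∀ (fuel : Nat) (acc : List Char), l.length ≤ fuel →
    PySem.Chars.replace.go ['0'] [] fuel l acc =
      acc.reverse ++ l.filter (fun c => !(c == '0')) := by
  induction l with
  | nil => intro fuel acc _; cases fuel <;> simp [PySem.Chars.replace.go]
  | cons c t ih =>
    intro fuel acc hf
    cases fuel with
    | zero => simp at hf
    | succ f =>
      have hpf : List.isPrefixOf ['0'] (c :: t) = ('0' == c) := by
        simp [List.isPrefixOf]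
      simp only [PySem.Chars.replace.go, hpf]
      by_cases hc : c = '0'
      · subst hc
        simp only [beq_self_eq_true, if_pos]
        rw [show List.drop (List.length ['0']) ('0' :: t) = t from rfl]
        rw [show List.reverse ([] : List Char) ++ acc = acc from rfl]
        rw [ih f acc (by simpa using hf)]
        simp
      · have hb : ('0' == c) = false := beq_eq_false_iff_ne.mpr (Ne.symm hc)
        rw [hb, if_neg (by simp)]
        rw [ih f (c :: acc) (by simpa using hf)]
        simp [hc]

theorem pvReplace0 (cs : List Char) :
    PySem.Chars.replace cs ['0'] [] = cs.filter (fun c => !(c == '0')) := by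
  simp only [PySem.Chars.replace, List.isEmpty, Bool.false_eq_true, if_false]
  rw [pvReplaceGo cs cs.length [] (le_refl _)]
  simp

-- length of the zero-free filter
theorem pvFilterLen (cs : List Char) :
    (cs.filter (fun c => !(c == '0'))).length + cs.count '0' = cs.length := by
  induction cs with
  | nil => simp
  | cons c t ih =>
    by_cases hc : c = '0'
    · subst hc; simp [List.count_cons]; omega
    · simp only [List.filter_cons, List.count_cons]
      have hb : (c == '0') = false := beq_eq_false_iff_ne.mpr hc
      simp [hb]
      omega

-- binary digit strings: structural version of Nat.toDigits 2
def pvDigs (n : Nat) : List Char :=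
  if _ : n < 2 then [n.digitChar] else pvDigs (n / 2) ++ [(n % 2).digitChar]
decreasing_by omega

theorem pvDigs_lt {n : Nat} (h : n < 2) : pvDigs n = [n.digitChar] := by
  rw [pvDigs]; simp [h]

theorem pvDigs_ge {n : Nat} (h : ¬ n < 2) : pvDigs n = pvDigs (n / 2) ++ [(n % 2).digitChar] := by
  rw [pvDigs]; simp [h]

theorem pvToDigitsCore_eq (fuel : Nat) : ∀ (n : Nat) (ds : List Char), n < fuel →
    Nat.toDigitsCore 2 fuel n ds = pvDigs n ++ ds := by
  induction fuel with
  | zero => intro n ds h; omega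
  | succ f ih =>
    intro n ds h
    rw [Nat.toDigitsCore]
    by_cases h2 : n < 2
    · have hz : n / 2 = 0 := by omega
      have hm : n % 2 = n := by omega
      rw [pvDigs_lt h2]
      simp [hz, hm]
    · have hz : ¬ n / 2 = 0 := by omega
      simp only [if_neg hz]
      rw [ih (n / 2) _ (by omega)]
      rw [pvDigs_ge h2]
      simp

theorem pvToDigits_eq (n : Nat) : Nat.toDigits 2 n = pvDigs n := by
  rw [Nat.toDigits, pvToDigitsCore_eq (n + 1) n [] (by omega)]
  simp

theorem pvDigs_mem (n : Nat) : ∀ c ∈ pvDigs n, c = '0' ∨ c = '1' := by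
  induction n using Nat.strong_induction_on with
  | _ n ih =>
    intro c hc
    by_cases h2 : n < 2
    · rw [pvDigs_lt h2] at hc
      simp at hc
      interval_cases n <;> simp [hc, Nat.digitChar]
    · rw [pvDigs_ge h2] at hc
      simp at hc
      rcases hc with hc | hc
      · exact ih (n / 2) (by omega) c hc
      · have : n % 2 = 0 ∨ n % 2 = 1 := by omega
        rcases this with h | h <;> rw [h] at hc <;> simp [Nat.digitChar] at hc <;> simp [hc]

theorem pvDigs_ne_nil (n : Nat) : pvDigs n ≠ [] := by
  by_cases h2 : n < 2
  · rw [pvDigs_lt h2]; simp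
  · rw [pvDigs_ge h2]; simp

theorem pvDigs_count1 (n : Nat) : (pvDigs n).count '1' = PySem.Int.bitCount (n : Int) := by
  induction n using Nat.strong_induction_on with
  | _ n ih =>
    by_cases h2 : n < 2
    · interval_cases n <;> rw [pvDigs_lt (by omega)] <;> decide
    · rw [pvDigs_ge h2]
      rw [PySem.Int.bitCount_natCast (by omega)]
      rw [List.count_append, ih (n / 2) (by omega)]
      have : n % 2 = 0 ∨ n % 2 = 1 := by omega
      rcases this with h | h <;> rw [h] <;> simp [Nat.digitChar, List.count_cons] <;> omega

theorem pvDigs_len (n : Nat) (hn : 1 ≤ n) : (pvDigs n).length = PySem.Int.bitLength (n : Int) := by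
  induction n using Nat.strong_induction_on with
  | _ n ih =>
    by_cases h2 : n < 2
    · have : n = 1 := by omega
      subst this
      rw [pvDigs_lt (by omega)]
      decide
    · rw [pvDigs_ge h2]
      rw [PySem.Int.bitLength_natCast (by omega)]
      rw [List.length_append, ih (n / 2) (by omega) (by omega)]
      simp

-- a list of binary digits: counts add up to the length
theorem pvCount01 (l : List Char) (h : ∀ c ∈ l, c = '0' ∨ c = '1') :
    l.count '0' + l.count '1' = l.length := by
  induction l with
  | nil => simp
  | cons c t ih =>
    have hc := h c (by simp)
    have ht : ∀ c ∈ t, c = '0' ∨ c = '1' := fun c hc => h c (by simp [hc])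
    rcases hc with hx | hx <;> subst hx <;>
      · simp [List.count_cons]
        have := ih ht
        omega

theorem pvDigs_count0 (n : Nat) (hn : 1 ≤ n) :
    ((pvDigs n).count '0' : Int) =
      (PySem.Int.bitLength (n : Int) : Int) - (PySem.Int.bitCount (n : Int) : Int) := by
  have h01 := pvCount01 (pvDigs n) (pvDigs_mem n)
  rw [pvDigs_count1, pvDigs_len n hn] at h01
  have hle := PySem.Int.bitCount_le_bitLength (n : Int)
  omega

theorem pvDigs_filter_len (n : Nat) :
    ((pvDigs n).filter (fun c => !(c == '0'))).length = PySem.Int.bitCount (n : Int) := by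
  have h := pvFilterLen (pvDigs n)
  have h01 := pvCount01 (pvDigs n) (pvDigs_mem n)
  rw [pvDigs_count1] at h01
  omega

theorem pvBitCount_pos (n : Nat) (hn : 1 ≤ n) : 1 ≤ PySem.Int.bitCount (n : Int) := by
  induction n using Nat.strong_induction_on with
  | _ n ih =>
    by_cases h2 : n < 2
    · have : n = 1 := by omega
      subst this
      decide
    · rw [PySem.Int.bitCount_natCast (by omega)]
      have := ih (n / 2) (by omega) (by omega)
      omega

-- bin(m)[2:] = the digit list of m
theorem pvBinSlice (m : Nat) :
    PySem.Chars.slice (PySem.Int.pyBin (m : Int)).toList (some 2) none = pvDigs m := by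
  rw [PySem.Chars.slice_eq_listSlice, PySem.Int.toList_pyBin]
  rw [PySem.List.slice_from _ (by omega)]
  simp only [PySem.Int.toBinChars0b]
  rw [if_neg (by omega)]
  simp [pvToDigits_eq]

-- A's string loop on the digits of n computes the trajectory values
theorem pvLoopA_eq (n : Nat) : 1 ≤ n → ∀ (fuel : Nat), n < fuel → ∀ (i zero : Int),
    solLoopA fuel (pvDigs n) i zero =
      [i + stepsFrom (n : Int), zero + zerosFrom (n : Int)] := by
  induction n using Nat.strong_induction_on with
  | _ n ih =>
    intro hn fuel hf i zero
    cases fuel with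
    | zero => omega
    | succ f =>
      by_cases h2 : n < 2
      · have : n = 1 := by omega
        subst this
        rw [pvDigs_lt (by omega)]
        rw [solLoopA, if_pos (by decide)]
        rw [stepsFrom_lt2 (by omega), zerosFrom_lt2 (by omega)]
        simp
      · have hne : pvDigs n ≠ ['1'] := by
          intro h
          have h1 : (pvDigs n).length = 1 := by rw [h]; rfl
          rw [pvDigs_ge h2] at h1
          simp at h1
          exact pvDigs_ne_nil (n / 2) h1
        rw [solLoopA, if_neg hne]
        simp only [pvCount0, pvReplace0, pvDigs_filter_len, pvBinSlice]
        have hbc1 : 1 ≤ PySem.Int.bitCount (n : Int) := pvBitCount_pos n (by omega)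
        have hbclt : PySem.Int.bitCount (n : Int) < n := pvBitCount_lt n (by omega)
        rw [ih (PySem.Int.bitCount (n : Int)) hbclt hbc1 f
          (Nat.lt_of_lt_of_le hbclt (by omega))]
        have hS : stepsFrom (n : Int) = stepsFrom (PySem.Int.bitCount (n : Int) : Int) + 1 :=
          stepsFrom_ge2 (by push_cast; omega)
        have hZ : zerosFrom (n : Int) = zerosFrom (PySem.Int.bitCount (n : Int) : Int) +
            ((PySem.Int.bitLength (n : Int) : Int) - (PySem.Int.bitCount (n : Int) : Int)) :=
          zerosFrom_ge2 (by push_cast; omega)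
        rw [hS, hZ, pvDigs_count0 n (by omega)]
        simp only [List.cons.injEq, and_true]
        exact ⟨by ring, by ring⟩

-- the DP fold builds exactly the tables of trajectory values for 0..m
theorem pvDP (m : Nat) (hm : 1 ≤ m) :
    (PySem.List.pyRange 2 ((m : Int) + 1) 1).foldl
      (fun (st : List Int × List Int) (k : Int) =>
        (st.1 ++ [PySem.List.pyGetD st.1 (PySem.Int.bitCount k : Int) 0 + 1],
         st.2 ++ [PySem.List.pyGetD st.2 (PySem.Int.bitCount k : Int) 0 +
           ((PySem.Int.bitLength k : Int) - (PySem.Int.bitCount k : Int))]))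
      ([0, 0], [0, 0]) =
    ((List.range (m + 1)).map (fun j : Nat => stepsFrom (j : Int)),
     (List.range (m + 1)).map (fun j : Nat => zerosFrom (j : Int))) := by
  induction m with
  | zero => omega
  | succ m ih =>
    by_cases hm1 : m = 0
    · subst hm1
      rw [PySem.List.pyRange_one_eq_nil (by omega)]
      simp [List.range_succ, stepsFrom_lt2, zerosFrom_lt2]
    · have hm' : 1 ≤ m := by omega
      have hsplit : PySem.List.pyRange 2 ((m : Int) + 1 + 1) 1 =
          PySem.List.pyRange 2 ((m : Int) + 1) 1 ++ [(m : Int) + 1] :=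
        PySem.List.pyRange_one_succ_right (by push_cast; omega)
      push_cast
      rw [hsplit, List.foldl_append, ih hm']
      have hp_lt : PySem.Int.bitCount ((m : Int) + 1) < m + 1 := by
        have : ((m : Int) + 1) = ((m + 1 : Nat) : Int) := by push_cast; ring
        rw [this]
        exact pvBitCount_lt (m + 1) (by omega)
      simp only [List.foldl_cons, List.foldl_nil]
      have hgetS : PySem.List.pyGetD
          ((List.range (m + 1)).map (fun j : Nat => stepsFrom (j : Int)))
          ((PySem.Int.bitCount ((m : Int) + 1) : Int)) 0 =
          stepsFrom ((PySem.Int.bitCount ((m : Int) + 1) : Nat) : Int) := by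
        rw [PySem.List.pyGetD_natCast]
        rw [List.getD_eq_getElem _ _ (by simpa using hp_lt)]
        simp only [List.getElem_map, List.getElem_range]
      have hgetZ : PySem.List.pyGetD
          ((List.range (m + 1)).map (fun j : Nat => zerosFrom (j : Int)))
          ((PySem.Int.bitCount ((m : Int) + 1) : Int)) 0 =
          zerosFrom ((PySem.Int.bitCount ((m : Int) + 1) : Nat) : Int) := by
        rw [PySem.List.pyGetD_natCast]
        rw [List.getD_eq_getElem _ _ (by simpa using hp_lt)]
        simp only [List.getElem_map, List.getElem_range]
      refine Prod.ext ?_ ?_ <;> simp only []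
      · conv_rhs => rw [List.range_succ]
        rw [List.map_append, List.map_cons, List.map_nil, List.append_cancel_left_eq]
        have hS2 : stepsFrom ((m : Int) + 1) =
            stepsFrom (PySem.Int.bitCount ((m : Int) + 1) : Int) + 1 :=
          stepsFrom_ge2 (by push_cast; omega)
        rw [hgetS]
        push_cast
        rw [hS2]
      · conv_rhs => rw [List.range_succ]
        rw [List.map_append, List.map_cons, List.map_nil, List.append_cancel_left_eq]
        have hZ2 : zerosFrom ((m : Int) + 1) =
            zerosFrom (PySem.Int.bitCount ((m : Int) + 1) : Int) +
              ((PySem.Int.bitLength ((m : Int) + 1) : Int) -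
                (PySem.Int.bitCount ((m : Int) + 1) : Int)) :=
          zerosFrom_ge2 (by push_cast; omega)
        rw [hgetZ]
        push_cast
        rw [hZ2]

-- main equality on Pre_
theorem pvMain (s : String) (hpre : Pre_solution s) : solution s = solution_alt s := by
  by_cases h1 : s = "1"
  · subst h1
    decide
  · have hcs : s.toList ≠ ['1'] := fun h => h1 (String.toList_inj.mp h)
    unfold Pre_solution at hpre
    simp only [List.any_eq_true, decide_eq_true_eq] at hpre
    obtain ⟨c, hc, hcne⟩ := hpre
    have hmem : c ∈ s.toList.filter (fun c => !(c == '0')) := by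
      simp [List.mem_filter, hc, hcne]
    set m := (s.toList.filter (fun c => !(c == '0'))).length with hmdef
    have hm1 : 1 ≤ m := List.length_pos_of_mem hmem
    have hlen := pvFilterLen s.toList
    -- A side: unfold the first round then apply the trajectory lemma
    rw [solution, solLoopA, if_neg hcs]
    simp only [pvCount0, pvReplace0, zero_add, ← hmdef, pvBinSlice]
    rw [pvLoopA_eq m hm1 (s.toList.length + 1) (by omega) 1 (s.toList.count '0' : Int)]
    -- B side
    rw [solution_alt, if_neg h1]
    have hcount : PySem.Str.count s "0" = s.toList.count '0' := by
      rw [PySem.Str.count_eq]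
      exact pvCount0 s.toList
    have hn : PySem.Str.len s - (s.toList.count '0' : Int) = (m : Int) := by
      simp only [PySem.Str.len_eq]
      push_cast
      omega
    simp only [hcount]
    rw [hn, pvDP m hm1]
    have hget : ∀ (f : Int → Int), PySem.List.pyGetD
        ((List.range (m + 1)).map (fun j : Nat => f (j : Int))) ((m : Int)) 0 = f (m : Int) := by
      intro f
      rw [PySem.List.pyGetD_natCast]
      rw [List.getD_eq_getElem _ _ (by simpa using Nat.lt_succ_self m)]
      simp only [List.getElem_map, List.getElem_range]
    rw [hget, hget]
    simp only [List.cons.injEq, and_true]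
    exact ⟨by ring, by ring⟩

-- ===== VERDICT (by name: the statement is the Claim_ definition above) =====
theorem solution_spec : Claim_equal_solution := by
  intro s _ hpre
  unfold Spec_solution
  exact pvMain s hpre
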